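-- pv_equiv track=rewrite | github.com/chadfraser/AdventOfCode2018 | 05-AlchemicalReduction.py | find_letter_to_remove_for_shortest_reaction_length
-- ===== SOURCE A (Python) =====
-- from string import ascii_lowercase
--
-- def remove_repeated_letters_with_opposite_case(given_string, previous_index):
--     """Given a string a multiple letters in both lower and uppercase, finds the first consecutive pair of letters of
--      opposite case and returns a string identical to the given string with those letters removed.
--
--     :param given_string: The string from which we want to remove repeated letters of opposite case
--     :param previous_index: The index at which we found a repeated letters of opposite case the last time we called this
--                            method
--     :return: The given string with the first consecutive pair of letters of opposite case omitted,
--     """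
--
--     # To prevent IndexErrors, we set a minimum value of 1 for previous_index
--     previous_index = max(previous_index, 1)
--     index = previous_index
--     for index, char in enumerate(given_string[previous_index - 1 : -1], start=previous_index - 1):
--         following_char = given_string[index + 1]
--         if char.isupper() == following_char.islower() and char.upper() == following_char.upper():
--             try:
--                 new_string = given_string[:index] + given_string[index + 2:]
--                 return new_string, index
--             except IndexError:
--                 new_string = given_string[:index]
--                 return new_string, index
--     return given_string, index
--
-- def get_length_of_string_after_reacting(current_string):
--     """Finds the length of a string after 'reacting' it (Iteratively removing all consecutive pairs of letters, one
--      upper case and one lower case, until no such consecutive pairs exist in the string).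
--
--     :param current_string: The string we wish to react
--     :return: The length of the string after reacting
--     """
--     previous_index = 0
--
--     while True:
--         previous_line = current_string
--         current_string, previous_index = remove_repeated_letters_with_opposite_case(current_string, previous_index)
--         if current_string == previous_line:
--             break
--     return len(current_string)
--
-- def find_letter_to_remove_for_shortest_reaction_length(initial_string):
--     """Checks the length of each string after reacting it and removing all instances of each letter in turn, and
--      returns the letter and length of the string that is shortest after reacting.
--
--     :param initial_string: The string we wish to remove letters from and then react
--     :return: The letter that we can remove all instances of to get the shortest string after reacting, and the length
--              of that string
--     """
--     shortest_length = float('inf')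
--     letter_with_best_reaction = ""
--
--     for letter in ascii_lowercase:
--         current_line = initial_string.replace(letter, "").replace(letter.upper(), "")
--         current_length = get_length_of_string_after_reacting(current_line)
--         if current_length < shortest_length:
--             shortest_length = current_length
--             letter_with_best_reaction = letter
--     return letter_with_best_reaction, shortest_length
-- ===== SOURCE B (Python) =====
-- from string import ascii_lowercase
--
--
-- def find_letter_to_remove_for_shortest_reaction_length(initial_string):
--     """For each lowercase letter, strip both cases of it from the string, fully
--     react the remainder with a single stack pass, and return the first letter
--     achieving the shortest reacted length together with that length."""
--     best_letter, best_length = "", None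
--     for letter in ascii_lowercase:
--         upper = letter.upper()
--         stack = []
--         for ch in initial_string:
--             if ch == letter or ch == upper:
--                 continue
--             if stack and stack[-1] == ch.swapcase():
--                 stack.pop()
--             else:
--                 stack.append(ch)
--         if best_length is None or len(stack) < best_length:
--             best_letter, best_length = letter, len(stack)
--     return best_letter, best_length
-- ===== Notes on version B (the rewrite author's own statement) =====
-- stated objective: alternative
-- what changed: Replaces the rescan-and-splice reaction loop (repeatedly rebuilding the string after each removed pair) with a single stack pass per candidate letter that pushes characters and pops matching opposite-case pairs.
import Mathlib
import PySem

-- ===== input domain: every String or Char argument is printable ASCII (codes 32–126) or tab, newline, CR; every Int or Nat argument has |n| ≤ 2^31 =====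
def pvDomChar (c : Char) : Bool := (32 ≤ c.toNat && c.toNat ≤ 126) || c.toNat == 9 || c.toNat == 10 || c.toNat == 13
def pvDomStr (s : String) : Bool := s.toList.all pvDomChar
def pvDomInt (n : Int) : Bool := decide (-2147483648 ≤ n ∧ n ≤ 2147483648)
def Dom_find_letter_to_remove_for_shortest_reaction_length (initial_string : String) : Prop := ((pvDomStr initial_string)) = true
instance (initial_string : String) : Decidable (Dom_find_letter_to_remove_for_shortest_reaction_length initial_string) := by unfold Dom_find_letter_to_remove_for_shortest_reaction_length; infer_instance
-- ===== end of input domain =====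

-- B replaces A's rescan-and-splice reaction loop by one stack pass per candidate letter
-- (push a char, pop when it forms an opposite-case pair with the stack top).

-- ===== PORT A =====
-- 'char.isupper() == following_char.islower() and char.upper() == following_char.upper()'
def pvReacts (c d : Char) : Bool :=
  (PySem.Chars.isupper c == PySem.Chars.islower d) && (PySem.Chars.upperChar c == PySem.Chars.upperChar d)

-- the 'for index, char in enumerate(given_string[previous_index-1:-1], start=previous_index-1)' loop
def pvRemoveScan (s : List Char) (pairs : List (Int × Char)) (idx : Int) : List Char × Int :=
  match pairs with
  | [] => (s, idx)
  | (i, c) :: rest =>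
    match PySem.List.pyGet? s (i + 1) with
    | none => (s, idx)  -- unreachable: the enumerated slice stops before the last character, so index+1 is in range
    | some d =>
      if pvReacts c d then
        -- the 'except IndexError' branch is dead code in Python (slicing never raises); only the try branch is ported
        (PySem.List.slice s none (some i) ++ PySem.List.slice s (some (i + 2)) none, i)
      else pvRemoveScan s rest i

def remove_repeated_letters_with_opposite_case (given_string : List Char) (previous_index : Int) :
    List Char × Int :=
  let p := max previous_index 1
  pvRemoveScan given_string
    (PySem.List.enumerate (PySem.List.slice given_string (some (p - 1)) (some (-1))) (p - 1)) p

-- index bound on the enumerated pairs, used only for the termination proof of pvReactGo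
theorem pvEnumerate_fst_nonneg {α : Type} (l : List α) (k : Int) (hk : 0 ≤ k) :
    ∀ x ∈ PySem.List.enumerate l k, 0 ≤ x.1 := by
  induction l generalizing k with
  | nil => simp [PySem.List.enumerate]
  | cons a t ih =>
    intro x hx
    simp only [PySem.List.enumerate, List.mem_cons] at hx
    rcases hx with h | h
    · simpa [h] using hk
    · exact ih (k + 1) (by omega) x h

theorem pvRemoveScan_shrink (s : List Char) (pairs : List (Int × Char)) (idx : Int)
    (hp : ∀ x ∈ pairs, 0 ≤ x.1) :
    (pvRemoveScan s pairs idx).1 = s ∨ (pvRemoveScan s pairs idx).1.length + 2 = s.length := by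
  induction pairs generalizing idx with
  | nil => exact Or.inl rfl
  | cons hd rest ih =>
    obtain ⟨i, c⟩ := hd
    have hi : 0 ≤ i := hp (i, c) (List.mem_cons_self ..)
    show (pvRemoveScan s ((i, c) :: rest) idx).1 = s ∨ _
    rw [pvRemoveScan]
    cases hg : PySem.List.pyGet? s (i + 1) with
    | none => exact Or.inl rfl
    | some d =>
      by_cases hr : pvReacts c d = true
      · simp only [hr, if_pos]
        right
        have hrange : (i + 1).toNat < s.length := by
          have hin : PySem.Raise.InRange s.length (i + 1) := by
            by_contra hc
            rw [← PySem.List.pyGet?_eq_none_iff] at hc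
            simp [hg] at hc
          simp only [PySem.Raise.InRange] at hin
          omega
        have h1 : PySem.List.slice s none (some i) = s.take i.toNat :=
          PySem.List.slice_to s hi
        have h2 : PySem.List.slice s (some (i + 2)) none = s.drop (i + 2).toNat :=
          PySem.List.slice_from s (by omega)
        simp only [h1, h2, List.length_append, List.length_take, List.length_drop]
        omega
      · simp only [hr, if_neg, Bool.false_eq_true, not_false_iff]
        exact ih i (fun x hx => hp x (List.mem_cons_of_mem _ hx))

theorem pvRemove_shrink (s : List Char) (p : Int) :
    (remove_repeated_letters_with_opposite_case s p).1 = s ∨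
    (remove_repeated_letters_with_opposite_case s p).1.length + 2 = s.length := by
  unfold remove_repeated_letters_with_opposite_case
  exact pvRemoveScan_shrink _ _ _ (pvEnumerate_fst_nonneg _ _ (by omega))

-- the 'while True' loop of get_length_of_string_after_reacting
def pvReactGo (s : List Char) (p : Int) : List Char :=
  let r := remove_repeated_letters_with_opposite_case s p
  if h : r.1 = s then s else pvReactGo r.1 r.2
termination_by s.length
decreasing_by
  rcases pvRemove_shrink s p with h' | h'
  · exact absurd h' h
  · omega

def get_length_of_string_after_reacting (current_string : List Char) : Int :=
  ((pvReactGo current_string 0).length : Int)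

def pvAsciiLower : List Char := "abcdefghijklmnopqrstuvwxyz".toList

def find_letter_to_remove_for_shortest_reaction_length (initial_string : String) : String × Int :=
  -- float('inf') sentinel modelled by Option Int (none = inf; every Int compares below it)
  let r := pvAsciiLower.foldl (fun (acc : String × Option Int) letter =>
      let current_line := PySem.Chars.replace
        (PySem.Chars.replace initial_string.toList [letter] []) [PySem.Chars.upperChar letter] []
      let current_length := get_length_of_string_after_reacting current_line
      if (match acc.2 with | none => true | some m => decide (current_length < m)) then
        (String.mk [letter], some current_length)
      else acc) ("", none)
  (r.1, r.2.getD 0)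

-- ===== PORT B =====
-- ch.swapcase() for a single character; exact on the ASCII domain
def pvSwap (c : Char) : Char :=
  if 97 ≤ c.toNat ∧ c.toNat ≤ 122 then Char.ofNat (c.toNat - 32)
  else if 65 ≤ c.toNat ∧ c.toNat ≤ 90 then Char.ofNat (c.toNat + 32)
  else c

-- push ch, or pop when the top is its opposite-case partner (stack top = list head)
def pvStep (st : List Char) (ch : Char) : List Char :=
  match st with
  | t :: rest => if t = pvSwap ch then rest else ch :: t :: rest
  | [] => [ch]

-- the inner 'for ch in initial_string' loop of Source B (the 'continue' filter and the stack update)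
def pvReduce (s : List Char) (letter upper : Char) : List Char :=
  s.foldl (fun st ch => if ch = letter ∨ ch = upper then st else pvStep st ch) []

def find_letter_to_remove_for_shortest_reaction_length_alt (initial_string : String) : String × Int :=
  -- best_length = None modelled by Option Int
  let r := pvAsciiLower.foldl (fun (acc : String × Option Int) letter =>
      let stack := pvReduce initial_string.toList letter (PySem.Chars.upperChar letter)
      if (match acc.2 with | none => true | some m => decide ((stack.length : Int) < m)) then
        (String.mk [letter], some (stack.length : Int))
      else acc) ("", none)
  (r.1, r.2.getD 0)

-- ===== PRECONDITION & SPEC =====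
def Spec_find_letter_to_remove_for_shortest_reaction_length (initial_string : String) (out : String × Int) : Prop := out = find_letter_to_remove_for_shortest_reaction_length_alt initial_string
instance (initial_string : String) (out : String × Int) : Decidable (Spec_find_letter_to_remove_for_shortest_reaction_length initial_string out) := by unfold Spec_find_letter_to_remove_for_shortest_reaction_length; infer_instance

-- ===== CLAIM (what is proved, stated in full; the proofs are below) =====
def Claim_equal_find_letter_to_remove_for_shortest_reaction_length : Prop := ∀ (initial_string : String), Dom_find_letter_to_remove_for_shortest_reaction_length initial_string → Spec_find_letter_to_remove_for_shortest_reaction_length initial_string (find_letter_to_remove_for_shortest_reaction_length initial_string)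

-- ===== LEMMAS AND PROOFS =====

-- ASCII facts about the two pairing predicates, established by decision over the 128 ASCII codes

set_option maxRecDepth 4096 in
theorem pvBridge_aux : ∀ m < 128, ∀ n < 128,
    pvReacts (Char.ofNat m) (Char.ofNat n) = (pvSwap (Char.ofNat m) == Char.ofNat n) := by decide

theorem pvInvol_aux : ∀ m < 128, pvSwap (pvSwap (Char.ofNat m)) = Char.ofNat m := by decide

theorem pvBridge (c d : Char) (hc : c.toNat < 128) (hd : d.toNat < 128) :
    pvReacts c d = (pvSwap c == d) := by
  have h := pvBridge_aux c.toNat hc d.toNat hd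
  simpa [Char.ofNat_toNat] using h

theorem pvInvol (c : Char) (hc : c.toNat < 128) : pvSwap (pvSwap c) = c := by
  simpa [Char.ofNat_toNat] using pvInvol_aux c.toNat hc

theorem pvSwap_comm (c d : Char) (hc : c.toNat < 128) (hd : d.toNat < 128) :
    (pvSwap c = d) ↔ (c = pvSwap d) := by
  constructor
  · intro h; rw [← h, pvInvol c hc]
  · intro h; rw [h, pvInvol d hd]

-- str.replace(letter, "") on a single-character pattern is a filter

theorem pvReplaceGo (c : Char) : ∀ (fuel : Nat) (l acc : List Char), l.length ≤ fuel →
    PySem.Chars.replace.go [c] [] fuel l acc = acc.reverse ++ l.filter (fun x => !(x == c)) := by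
  intro fuel
  induction fuel with
  | zero =>
    intro l acc hl
    have : l = [] := List.length_eq_zero_iff.mp (Nat.le_zero.mp hl)
    subst this
    simp [PySem.Chars.replace.go]
  | succ n ih =>
    intro l acc hl
    cases l with
    | nil => simp [PySem.Chars.replace.go]
    | cons x t =>
      rw [PySem.Chars.replace.go]
      have hl' : t.length ≤ n := by simpa using Nat.le_of_succ_le_succ hl
      by_cases hx : x = c
      · subst hx
        have hp : [x].isPrefixOf (x :: t) = true := by simp [List.isPrefixOf]
        simp only [hp, if_true]
        simp only [List.length_cons, List.length_nil, List.drop_succ_cons, List.drop_zero,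
          List.reverse_nil, List.nil_append]
        rw [ih t acc hl']
        simp
      · have hp : [c].isPrefixOf (x :: t) = false := by
          simp [List.isPrefixOf]
          exact fun h => absurd h.symm hx
        simp only [hp, Bool.false_eq_true, if_neg, not_false_iff]
        rw [ih t (x :: acc) hl']
        simp [hx]

theorem pvReplace_filter (cs : List Char) (c : Char) :
    PySem.Chars.replace cs [c] [] = cs.filter (fun x => !(x == c)) := by
  unfold PySem.Chars.replace
  simp only [List.isEmpty_cons, Bool.false_eq_true, if_neg, not_false_iff]
  simpa using pvReplaceGo c cs.length cs [] le_rfl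

-- s[b:-1] = dropLast (drop b s)

theorem pvSlice_neg_one (s : List Char) (b : Nat) :
    PySem.List.slice s (some (b : Int)) (some (-1)) = (s.drop b).dropLast := by
  simp only [PySem.List.slice, PySem.List.clampIdx]
  have e1 : (if (-1:Int) < 0 then if (s.length:Int) + -1 < 0 then 0 else ((s.length:Int) + -1).toNat else min (-1:Int).toNat s.length) = s.length - 1 := by
    split_ifs with h1 h2 <;> omega
  have e2 : (if (b:Int) < 0 then if (s.length:Int) + (b:Int) < 0 then 0 else ((s.length:Int) + (b:Int)).toNat else min ((b:Int)).toNat s.length) = min b s.length := by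
    split_ifs with h1 <;> omega
  rw [e1, e2, List.dropLast_eq_take]
  by_cases hb : b ≤ s.length
  · have : min b s.length = b := by omega
    rw [this]
    congr 1
    simp [List.length_drop]
    omega
  · have h1 : min b s.length = s.length := by omega
    have h4 : s.drop b = [] := List.drop_eq_nil_of_le (by omega)
    rw [h1, h4]
    simp



theorem pvPairs_stop (s : List Char) (b : Nat) (hb : ¬ (b + 1 < s.length)) :
    (s.drop b).dropLast = [] := by
  rw [List.dropLast_eq_take]
  simp [List.length_drop]
  omega

theorem pvPairs_cons (s : List Char) (b : Nat) (hb : b + 1 < s.length) :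
    (s.drop b).dropLast = (s[b]'(by omega)) :: (s.drop (b + 1)).dropLast := by
  rw [List.drop_eq_getElem_cons (by omega)]
  rw [List.dropLast_cons_of_ne_nil]
  intro h
  have := List.length_drop (l := s) (i := b + 1)
  rw [h] at this
  simp at this
  omega

theorem pvEnum_cons {α : Type} (x : α) (t : List α) (k : Int) :
    PySem.List.enumerate (x :: t) k = (k, x) :: PySem.List.enumerate t (k + 1) := rfl

theorem pvScan_spec (s : List Char) (fuel : Nat) : ∀ (b : Nat) (idx : Int), s.length ≤ b + fuel →
    ((pvRemoveScan s (PySem.List.enumerate ((s.drop b).dropLast) (b : Int)) idx).1 = s ∧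
      (∀ j, b ≤ j → (hj : j + 1 < s.length) → pvReacts (s[j]'(by omega)) (s[j+1]'hj) = false))
    ∨ (∃ i : Nat, b ≤ i ∧ ∃ (hi : i + 1 < s.length),
        pvReacts (s[i]'(by omega)) (s[i+1]'hi) = true ∧
        (∀ j, b ≤ j → j < i → (hj : j + 1 < s.length) → pvReacts (s[j]'(by omega)) (s[j+1]'hj) = false) ∧
        pvRemoveScan s (PySem.List.enumerate ((s.drop b).dropLast) (b : Int)) idx
          = (s.take i ++ s.drop (i + 2), (i : Int))) := by
  induction fuel with
  | zero =>
    intro b idx hlen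
    left
    constructor
    · rw [pvPairs_stop s b (by omega)]
      rfl
    · intro j hj hj1
      omega
  | succ n ih =>
    intro b idx hlen
    by_cases hb : b + 1 < s.length
    · rw [pvPairs_cons s b hb, pvEnum_cons, pvRemoveScan]
      have hc : ((b : Int) + 1) = ((b + 1 : Nat) : Int) := by push_cast; ring
      rw [hc, PySem.List.pyGet?_natCast, List.getElem?_eq_getElem hb]
      simp only
      cases hr : pvReacts (s[b]'(by omega)) (s[b+1]'hb) with
      | true =>
        simp only [if_pos]
        right
        refine ⟨b, le_rfl, hb, hr, by intro j h1 h2 hj1; omega, ?_⟩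
        have h1 : PySem.List.slice s none (some (b : Int)) = s.take b := by
          rw [PySem.List.slice_to s (by omega)]
          simp
        have h2 : PySem.List.slice s (some ((b : Int) + 2)) none = s.drop (b + 2) := by
          rw [PySem.List.slice_from s (by omega)]
          have hc3 : ((b : Int) + 2).toNat = b + 2 := by omega
          rw [hc3]
        rw [h1, h2]
      | false =>
        simp only [Bool.false_eq_true, if_neg, not_false_iff]
        rcases ih (b + 1) (b : Int) (by omega) with ⟨h1, h2⟩ | ⟨i, hbi, hi, hri, hbet, heq⟩
        · left
          refine ⟨h1, ?_⟩
          intro j hj hj1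
          rcases Nat.eq_or_lt_of_le hj with h | h
          · subst h; exact hr
          · exact h2 j (by omega) hj1
        · right
          refine ⟨i, by omega, hi, hri, ?_, heq⟩
          intro j hj hji hj1
          rcases Nat.eq_or_lt_of_le hj with h | h
          · subst h; exact hr
          · exact hbet j (by omega) hji hj1
    · left
      constructor
      · rw [pvPairs_stop s b hb]; rfl
      · intro j hj hj1; omega

def pvIrred : List Char → Prop
  | x :: y :: l => y ≠ pvSwap x ∧ pvIrred (y :: l)
  | _ => True

theorem pvIrred_tail (x : Char) (rest : List Char) (h : pvIrred (x :: rest)) : pvIrred rest := by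
  cases rest with
  | nil => trivial
  | cons y t => exact h.2

theorem pvStep_irred (st : List Char) (ch : Char) (h : pvIrred st) : pvIrred (pvStep st ch) := by
  cases st with
  | nil => trivial
  | cons t rest =>
    rw [pvStep]
    by_cases ht : t = pvSwap ch
    · rw [if_pos ht]; exact pvIrred_tail t rest h
    · rw [if_neg ht]; exact ⟨ht, h⟩

theorem pvFoldl_irred (l : List Char) : ∀ st : List Char, pvIrred st → pvIrred (List.foldl pvStep st l) := by
  induction l with
  | nil => intro st h; exact h
  | cons c t ih => intro st h; exact ih _ (pvStep_irred st c h)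

theorem pvStepStep (st : List Char) (a b : Char) (hab : pvSwap a = b) (ha : a.toNat < 128)
    (hst : pvIrred st) : pvStep (pvStep st a) b = st := by
  have hba : a = pvSwap b := by rw [← hab, pvInvol a ha]
  cases st with
  | nil =>
    show pvStep [a] b = []
    rw [pvStep, if_pos hba]
  | cons t rest =>
    rw [pvStep]
    by_cases ht : t = pvSwap a
    · rw [if_pos ht]
      have htb : t = b := by rw [ht, hab]
      cases rest with
      | nil => rw [pvStep, htb]
      | cons u rest2 =>
        rw [pvStep]
        have hu : ¬ (u = pvSwap b) := by
          intro hub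
          exact hst.1 (by rw [hub, ← hba, ht, pvInvol a ha])
        rw [if_neg hu, htb]
    · rw [if_neg ht]
      show pvStep (a :: t :: rest) b = t :: rest
      rw [pvStep, if_pos hba]

theorem pvFoldl_pair (v st : List Char) (a b : Char) (hab : pvSwap a = b) (ha : a.toNat < 128)
    (hst : pvIrred st) : List.foldl pvStep st (a :: b :: v) = List.foldl pvStep st v := by
  simp only [List.foldl_cons]
  rw [pvStepStep st a b hab ha hst]

theorem pvFoldl_noadj : ∀ (l st : List Char),
    (∀ j, (hj : j + 1 < l.length) → (l[j]'(by omega)) ≠ pvSwap (l[j+1]'hj)) →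
    (∀ t rest c lt, st = t :: rest → l = c :: lt → t ≠ pvSwap c) →
    List.foldl pvStep st l = l.reverse ++ st := by
  intro l
  induction l with
  | nil => intro st _ _; simp
  | cons c lt ih =>
    intro st hnoadj hcompat
    have hpush : pvStep st c = c :: st := by
      cases st with
      | nil => rfl
      | cons t rest =>
        rw [pvStep, if_neg (hcompat t rest c lt rfl rfl)]
    rw [List.foldl_cons, hpush, ih (c :: st) ?noadj ?compat]
    · simp
    case noadj =>
      intro j hj
      have := hnoadj (j + 1) (by simpa using Nat.succ_lt_succ hj)
      simpa using this
    case compat =>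
      intro t rest d ltt hst hlt
      have h0 := hnoadj 0 (by simp [hlt])
      rw [List.cons.injEq] at hst
      subst hlt
      simp at h0
      rw [← hst.1]
      exact h0

theorem pvRed_removePair (s : List Char) (i : Nat) (hi : i + 1 < s.length)
    (hsw : pvSwap (s[i]'(by omega)) = s[i+1]'hi) (ha : (s[i]'(by omega)).toNat < 128) :
    List.foldl pvStep [] s = List.foldl pvStep [] (s.take i ++ s.drop (i + 2)) := by
  conv_lhs => rw [← List.take_append_drop i s]
  rw [List.drop_eq_getElem_cons (l := s) (by omega)]
  rw [List.drop_eq_getElem_cons (l := s) (i := i + 1) hi]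
  rw [List.foldl_append, List.foldl_append]
  have h1 : i + 1 + 1 = i + 2 := rfl
  rw [h1]
  exact pvFoldl_pair _ _ _ _ hsw ha (pvFoldl_irred _ [] trivial)

theorem pvReact_stack : ∀ (fuel : Nat) (s : List Char) (p : Int), s.length ≤ fuel →
    (∀ c ∈ s, c.toNat < 128) →
    (∀ j : Nat, ((j : Int) < max p 1 - 1) → (hj : j + 1 < s.length) →
      pvReacts (s[j]'(by omega)) (s[j+1]'hj) = false) →
    (pvReactGo s p).length = (List.foldl pvStep [] s).length := by
  intro fuel
  induction fuel with
  | zero =>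
    intro s p hlen _ _
    have hs : s = [] := List.length_eq_zero_iff.mp (Nat.le_zero.mp hlen)
    subst hs
    rw [pvReactGo]
    have hrm : remove_repeated_letters_with_opposite_case [] p = ([], max p 1) := by
      simp only [remove_repeated_letters_with_opposite_case]
      have h1 : PySem.List.slice [] (some (max p 1 - 1)) (some (-1)) = ([] : List Char) := by
        simp [PySem.List.slice]
      rw [h1]
      rfl
    rw [hrm]
    simp
  | succ n ih =>
    intro s p hlen hascii hinv
    have hp1 : (1 : Int) ≤ max p 1 := le_max_right p 1
    set b : Nat := (max p 1 - 1).toNat with hbdef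
    have hbc : ((b : Nat) : Int) = max p 1 - 1 := Int.toNat_of_nonneg (by omega)
    have hrm : remove_repeated_letters_with_opposite_case s p
        = pvRemoveScan s (PySem.List.enumerate ((s.drop b).dropLast) (b : Int)) (max p 1) := by
      simp only [remove_repeated_letters_with_opposite_case]
      rw [show max p 1 - 1 = (b : Int) from by omega, pvSlice_neg_one]
    rcases pvScan_spec s s.length b (max p 1) (by omega) with ⟨h1, h2⟩ | ⟨i, hbi, hi, hri, hbet, heq⟩
    · rw [pvReactGo, hrm, dif_pos h1]
      have hnoadj : ∀ j, (hj : j + 1 < s.length) → (s[j]'(by omega)) ≠ pvSwap (s[j+1]'hj) := by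
        intro j hj
        have ha1 : (s[j]'(by omega)).toNat < 128 := hascii _ (List.getElem_mem _)
        have ha2 : (s[j+1]'hj).toNat < 128 := hascii _ (List.getElem_mem _)
        have hre : pvReacts (s[j]'(by omega)) (s[j+1]'hj) = false := by
          by_cases hjb : j < b
          · exact hinv j (by omega) hj
          · exact h2 j (by omega) hj
        rw [pvBridge _ _ ha1 ha2] at hre
        intro hcon
        exact beq_eq_false_iff_ne.mp hre ((pvSwap_comm _ _ ha1 ha2).mpr hcon)
      rw [pvFoldl_noadj s [] hnoadj (by intro t rest c lt hst _; exact absurd hst (by simp))]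
      simp
    · rw [pvReactGo, hrm, heq]
      have hlt : i + (s.length - (i + 2)) < s.length := by
        have := List.length_take_of_le (l := s) (show i ≤ s.length by omega)
        omega
      have hne : s.take i ++ s.drop (i + 2) ≠ s := by
        intro hcon
        have := congrArg List.length hcon
        simp only [List.length_append, List.length_take, List.length_drop] at this
        omega
      rw [dif_neg hne]
      have ha1 : (s[i]'(by omega)).toNat < 128 := hascii _ (List.getElem_mem _)
      have ha2 : (s[i+1]'hi).toNat < 128 := hascii _ (List.getElem_mem _)
      have hsw : pvSwap (s[i]'(by omega)) = s[i+1]'hi := by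
        have h := hri
        rw [pvBridge _ _ ha1 ha2] at h
        exact beq_iff_eq.mp h
      show (pvReactGo (s.take i ++ s.drop (i + 2)) (i : Int)).length
        = (List.foldl pvStep [] s).length
      have hlen' : (s.take i ++ s.drop (i + 2)).length ≤ n := by
        simp only [List.length_append, List.length_take, List.length_drop]
        omega
      have hascii' : ∀ c ∈ s.take i ++ s.drop (i + 2), c.toNat < 128 := by
        intro c hc
        rcases List.mem_append.mp hc with h | h
        · exact hascii c (List.mem_of_mem_take h)
        · exact hascii c (List.mem_of_mem_drop h)
      have hinv' : ∀ j : Nat, ((j : Int) < max (i : Int) 1 - 1) →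
          (hj : j + 1 < (s.take i ++ s.drop (i + 2)).length) →
          pvReacts ((s.take i ++ s.drop (i + 2))[j]'(by omega))
            ((s.take i ++ s.drop (i + 2))[j+1]'hj) = false := by
        intro j hji hj
        have hj1i : j + 1 < i := by omega
        have hti : (s.take i).length = i := List.length_take_of_le (by omega)
        have e1 : (s.take i ++ s.drop (i + 2))[j]'(by omega) = s[j]'(by omega) := by
          rw [List.getElem_append_left (by omega)]
          exact List.getElem_take
        have e2 : (s.take i ++ s.drop (i + 2))[j+1]'hj = s[j+1]'(by omega) := by
          rw [List.getElem_append_left (by omega)]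
          exact List.getElem_take
        rw [e1, e2]
        by_cases hjb : j < b
        · exact hinv j (by omega) (by omega)
        · exact hbet j (by omega) (by omega) (by omega)
      rw [pvRed_removePair s i hi hsw ha1]
      exact ih (s.take i ++ s.drop (i + 2)) (i : Int) hlen' hascii' hinv'

theorem pvFilter_eq (L : List Char) (l u : Char) :
    PySem.Chars.replace (PySem.Chars.replace L [l] []) [u] []
      = L.filter (fun ch => !(ch == l || ch == u)) := by
  rw [pvReplace_filter, pvReplace_filter, List.filter_filter]
  apply List.filter_congr
  intro x _
  cases x == l <;> cases x == u <;> simp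

theorem pvReduce_filter (L : List Char) (l u : Char) :
    pvReduce L l u = List.foldl pvStep [] (L.filter (fun ch => !(ch == l || ch == u))) := by
  rw [List.foldl_filter]
  unfold pvReduce
  apply PySem.List.foldl_congr_mem
  intro st ch _
  by_cases h : ch = l ∨ ch = u
  · rcases h with h | h <;> simp [h]
  · push Not at h
    simp [h.1, h.2]

theorem pvPerLetter (L : List Char) (hA : ∀ c ∈ L, c.toNat < 128) (l u : Char) :
    get_length_of_string_after_reacting
        (PySem.Chars.replace (PySem.Chars.replace L [l] []) [u] [])
      = ((pvReduce L l u).length : Int) := by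
  rw [pvFilter_eq, pvReduce_filter]
  unfold get_length_of_string_after_reacting
  congr 1
  apply pvReact_stack (L.filter (fun ch => !(ch == l || ch == u))).length _ 0 le_rfl
  · intro c hc
    exact hA c (List.mem_of_mem_filter hc)
  · intro j hj
    omega

-- ===== VERDICT (by name: the statement is the Claim_ definition above) =====
theorem find_letter_to_remove_for_shortest_reaction_length_spec : Claim_equal_find_letter_to_remove_for_shortest_reaction_length := by
  intro s hdom
  have hA : ∀ c ∈ s.toList, c.toNat < 128 := by
    intro c hc
    have h := hdom
    unfold Dom_find_letter_to_remove_for_shortest_reaction_length pvDomStr at h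
    rw [List.all_eq_true] at h
    have := h c hc
    simp [pvDomChar] at this
    omega
  unfold Spec_find_letter_to_remove_for_shortest_reaction_length
  unfold find_letter_to_remove_for_shortest_reaction_length
    find_letter_to_remove_for_shortest_reaction_length_alt
  simp only [pvPerLetter s.toList hA]
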